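-- pv_equiv track=rewrite | github.com/zxzx9404/problems | PGM/PGM 인사고과.py | solution
-- ===== SOURCE A (Python) =====
-- def solution(scores):
--     answer = 1
--     wan = scores[0]
--     scores = sorted(scores, key=lambda x : (x[0], -x[1]), reverse=True)
--     gijun = scores[0][1]
--     for i, j in scores:
--         if wan[0] < i and wan[1] < j:
--             return -1
--         if gijun <= j:
--             if sum(wan) < (i+j):
--                 answer += 1
--             gijun = j
--
--     return answer
-- ===== SOURCE B (Python) =====
-- def solution(scores):
--     wan = scores[0]
--     for f in scores:
--         if f[0] > wan[0] and f[1] > wan[1]: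
--             return -1
--     answer = 1
--     for e in scores:
--         if wan[0] + wan[1] < e[0] + e[1] and not any(f[0] > e[0] and f[1] > e[1] for f in scores):
--             answer += 1
--     return answer
-- ===== Notes on version B (the rewrite author's own statement) =====
-- stated objective: simpler
-- what changed: Dropped the sort-and-running-max entirely: B decides each employee's non-domination by a direct nested scan (any f strictly greater on both coordinates) and counts the non-dominated employees whose total beats employee 0's total.
import Mathlib
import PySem

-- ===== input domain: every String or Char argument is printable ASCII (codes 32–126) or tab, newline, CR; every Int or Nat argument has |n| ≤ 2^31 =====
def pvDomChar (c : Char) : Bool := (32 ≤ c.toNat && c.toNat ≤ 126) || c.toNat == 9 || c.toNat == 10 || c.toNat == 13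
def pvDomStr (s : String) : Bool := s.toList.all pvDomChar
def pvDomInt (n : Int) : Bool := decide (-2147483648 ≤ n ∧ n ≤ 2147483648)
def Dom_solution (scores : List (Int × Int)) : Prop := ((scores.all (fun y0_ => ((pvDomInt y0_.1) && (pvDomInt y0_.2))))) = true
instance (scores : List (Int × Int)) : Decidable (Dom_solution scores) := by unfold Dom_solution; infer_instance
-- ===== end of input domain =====

-- B replaces A's sort-plus-running-max with direct nested non-domination scans (simpler: no sort, no running state).
-- A rebinds 'scores' locally and does not mutate the caller's list; the equivalence is about the return value.

-- ===== PORT A =====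
-- A's for-loop with its early 'return -1'; state = (gijun, answer)
def loopA (wan : Int × Int) : List (Int × Int) → Int → Int → Int
  | [], _gijun, answer => answer
  | (i, j) :: rest, gijun, answer =>
    if wan.1 < i ∧ wan.2 < j then -1
    else if gijun ≤ j then
      loopA wan rest j (if wan.1 + wan.2 < i + j then answer + 1 else answer)
    else loopA wan rest gijun answer

def solution (scores : List (Int × Int)) : Int :=
  match PySem.List.pyGet? scores 0 with
  | none => 0  -- scores[0] raises IndexError on []; excluded by Pre_solution
  | some wan =>
    let s := PySem.List.sorted2 scores (fun x => x.1) (fun x => -x.2) true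
    match PySem.List.pyGet? s 0 with
    | none => 0  -- unreachable when scores ≠ []
    | some top => loopA wan s top.2 1

-- ===== PORT B =====
-- any(f[0] > e[0] and f[1] > e[1] for f in scores)
def dominatedB (scores : List (Int × Int)) (e : Int × Int) : Bool :=
  scores.any (fun f => decide (e.1 < f.1) && decide (e.2 < f.2))

def solution_alt (scores : List (Int × Int)) : Int :=
  match PySem.List.pyGet? scores 0 with
  | none => 0  -- scores[0] raises IndexError on []; excluded by Pre_solution
  | some wan =>
    if dominatedB scores wan then -1
    else
      scores.foldl
        (fun answer e =>
          if wan.1 + wan.2 < e.1 + e.2 ∧ ¬ dominatedB scores e = true then answer + 1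
          else answer) 1

-- ===== PRECONDITION & SPEC =====
-- Pre_ excludes only the empty list, on which both Pythons raise IndexError at scores[0].
def Pre_solution (scores : List (Int × Int)) : Prop := scores ≠ []
instance (scores : List (Int × Int)) : Decidable (Pre_solution scores) := by unfold Pre_solution; infer_instance
def pvWitness_solution : (List (Int × Int)) := [(2, 2), (1, 4), (3, 2)]

def Spec_solution (scores : List (Int × Int)) (out : Int) : Prop := out = solution_alt scores
instance (scores : List (Int × Int)) (out : Int) : Decidable (Spec_solution scores out) := by unfold Spec_solution; infer_instance

-- ===== CLAIM (what is proved, stated in full; the proofs are below) =====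
def Claim_equal_solution : Prop := ∀ (scores : List (Int × Int)), Dom_solution scores → Pre_solution scores → Spec_solution scores (solution scores)

-- ===== LEMMAS AND PROOFS =====

-- the comparator sorted2 ... true uses, as an explicit Bool function
def bfA (a b : Int × Int) : Bool :=
  decide (b.1 < a.1) || (!decide (a.1 < b.1) && decide (-b.2 < -a.2))

-- the pairwise order of the sorted list: a comes (weakly) before b
def Pb (a b : Int × Int) : Prop := bfA b a = false

lemma Pb_iff (a b : Int × Int) : Pb a b ↔ (b.1 < a.1 ∨ (a.1 = b.1 ∧ a.2 ≤ b.2)) := by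
  simp only [Pb, bfA, Bool.or_eq_false_iff, Bool.and_eq_false_iff, Bool.not_eq_false',
    decide_eq_false_iff_not, decide_eq_true_eq, not_lt]
  omega

lemma sorted2_eq_foldl (xs : List (Int × Int)) :
    PySem.List.sorted2 xs (fun x => x.1) (fun x => -x.2) true
      = xs.foldl (fun acc x => PySem.List.insertBy bfA x acc) [] := rfl

lemma insertBy_pairwise (x : Int × Int) (l : List (Int × Int)) (h : l.Pairwise Pb) :
    (PySem.List.insertBy bfA x l).Pairwise Pb := by
  induction l with
  | nil => simp [PySem.List.insertBy, Pb]
  | cons y ys ih =>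
    rcases List.pairwise_cons.1 h with ⟨hy, hys⟩
    by_cases hxy : bfA x y = true
    · simp only [PySem.List.insertBy, hxy]
      refine List.pairwise_cons.2 ⟨?_, h⟩
      intro z hz
      have hxy' : y.1 < x.1 ∨ (¬ x.1 < y.1 ∧ -y.2 < -x.2) := by
        simpa [bfA, Bool.or_eq_true, Bool.and_eq_true] using hxy
      rcases List.mem_cons.1 hz with hz | hz
      · subst hz
        rw [Pb_iff]; omega
      · have hyz := (Pb_iff y z).1 (hy z hz)
        rw [Pb_iff]; omega
    · have hxy' : bfA x y = false := by simpa using hxy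
      simp only [PySem.List.insertBy, hxy', Bool.false_eq_true, if_false]
      refine List.pairwise_cons.2 ⟨?_, ih hys⟩
      intro z hz
      rcases (PySem.List.mem_insertBy bfA x z ys).1 hz with hz | hz
      · subst hz; exact hxy'
      · exact hy z hz

lemma foldl_insertBy_pairwise (xs : List (Int × Int)) :
    ∀ acc : List (Int × Int), acc.Pairwise Pb →
    (xs.foldl (fun acc x => PySem.List.insertBy bfA x acc) acc).Pairwise Pb := by
  induction xs with
  | nil => intro acc h; simpa using h
  | cons x xs ih => intro acc h; exact ih _ (insertBy_pairwise x acc h)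

lemma sorted2_pairwise (xs : List (Int × Int)) :
    (PySem.List.sorted2 xs (fun x => x.1) (fun x => -x.2) true).Pairwise Pb := by
  rw [sorted2_eq_foldl]; exact foldl_insertBy_pairwise xs [] (by simp)

-- if some element of l strictly dominates wan, the loop returns -1
lemma loopA_neg (wan : Int × Int) (l : List (Int × Int)) (g a : Int)
    (h : ∃ f ∈ l, wan.1 < f.1 ∧ wan.2 < f.2) : loopA wan l g a = -1 := by
  induction l generalizing g a with
  | nil => simp at h
  | cons e rest ih =>
    obtain ⟨i, j⟩ := e
    rcases h with ⟨f, hf, hdom⟩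
    by_cases hd : wan.1 < i ∧ wan.2 < j
    · simp [loopA, hd]
    · have hf' : f ∈ rest := by
        rcases List.mem_cons.1 hf with hf | hf
        · subst hf; exact absurd hdom hd
        · exact hf
      simp only [loopA, if_neg hd]
      split <;> exact ih _ _ ⟨f, hf', hdom⟩

-- dominatedB as a proposition
lemma dominatedB_iff (S : List (Int × Int)) (e : Int × Int) :
    dominatedB S e = true ↔ ∃ f ∈ S, e.1 < f.1 ∧ e.2 < f.2 := by
  simp [dominatedB, List.any_eq_true, Bool.and_eq_true, decide_eq_true_eq]

-- counting characterisation of A's loop on the tail, with the processed prefix 'pre'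
-- and gijun g = the maximum second coordinate seen in pre
lemma loopA_count (wan : Int × Int) (S : List (Int × Int)) (hS : S.Pairwise Pb) :
    ∀ (l pre : List (Int × Int)) (g a : Int),
      S = pre ++ l →
      (∀ f ∈ l, ¬ (wan.1 < f.1 ∧ wan.2 < f.2)) →
      (∀ f ∈ pre, f.2 ≤ g) →
      (∃ f ∈ pre, g = f.2) →
      loopA wan l g a
        = a + ((l.filter (fun e =>
            decide (wan.1 + wan.2 < e.1 + e.2) && !dominatedB S e)).length : Int) := by
  intro l
  induction l with
  | nil => intro pre g a _ _ _ _; simp [loopA]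
  | cons hd rest ih =>
    intro pre g a hSeq hnd hg1 hg2
    obtain ⟨i, j⟩ := hd
    have hpre_l : ∀ f ∈ pre, ∀ e, e ∈ ((i, j) :: rest) → Pb f e := by
      have := hSeq ▸ hS
      rcases List.pairwise_append.1 this with ⟨_, _, h3⟩
      exact h3
    have hpw_l : ((i, j) :: rest).Pairwise Pb := by
      have := hSeq ▸ hS
      exact (List.pairwise_append.1 this).2.1
    rcases List.pairwise_cons.1 hpw_l with ⟨hhd_rest, _⟩
    have hnotdom : ¬ (wan.1 < i ∧ wan.2 < j) := hnd _ (List.mem_cons_self ..)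
    have hSeq' : S = (pre ++ [(i, j)]) ++ rest := by simp [hSeq]
    by_cases hgj : g ≤ j
    · -- head is counted by the loop iff the sum condition holds; it is never S-dominated here
      have hND : dominatedB S (i, j) = false := by
        rw [Bool.eq_false_iff]
        intro hdom
        rcases (dominatedB_iff S (i, j)).1 hdom with ⟨f, hfS, hf1, hf2⟩
        rw [hSeq, List.mem_append] at hfS
        rcases hfS with hfpre | hfl
        · have := hg1 f hfpre; omega
        · rcases List.mem_cons.1 hfl with hfl | hfl
          · subst hfl; omega
          · have := (Pb_iff _ _).1 (hhd_rest f hfl); omega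
      have hrec := ih (pre ++ [(i, j)]) j
        (if wan.1 + wan.2 < i + j then a + 1 else a) hSeq'
        (fun f hf => hnd f (List.mem_cons_of_mem _ hf))
        (by intro f hf
            rcases List.mem_append.1 hf with hf | hf
            · exact le_trans (hg1 f hf) hgj
            · simp at hf; subst hf; exact le_refl _)
        ⟨(i, j), List.mem_append.2 (Or.inr (by simp)), rfl⟩
      simp only [loopA, if_neg hnotdom, if_pos hgj, hrec, List.filter_cons, hND,
        Bool.not_false, Bool.and_true]
      by_cases hsum : wan.1 + wan.2 < i + j
      · rw [if_pos hsum, if_pos (decide_eq_true hsum)]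
        simp only [List.length_cons]
        push_cast
        omega
      · rw [if_neg hsum, if_neg (by simpa using hsum)]
    · -- head's gijun test fails, and indeed some earlier element S-dominates it
      have hdomhd : dominatedB S (i, j) = true := by
        rcases hg2 with ⟨f, hfpre, hgf⟩
        rw [dominatedB_iff]
        refine ⟨f, hSeq ▸ List.mem_append.2 (Or.inl hfpre), ?_⟩
        have := (Pb_iff _ _).1 (hpre_l f hfpre (i, j) (List.mem_cons_self ..))
        omega
      have hrec := ih (pre ++ [(i, j)]) g a hSeq'
        (fun f hf => hnd f (List.mem_cons_of_mem _ hf))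
        (by intro f hf
            rcases List.mem_append.1 hf with hf | hf
            · exact hg1 f hf
            · simp at hf; subst hf; omega)
        (by rcases hg2 with ⟨f, hfpre, hgf⟩
            exact ⟨f, List.mem_append.2 (Or.inl hfpre), hgf⟩)
      simp only [loopA, if_neg hnotdom, if_neg hgj, hrec, List.filter_cons, hdomhd,
        Bool.not_true, Bool.and_false, Bool.false_eq_true, if_false]

-- B's counting loop = 1 + length of the filtered list
lemma foldl_count (wan : Int × Int) (scores : List (Int × Int)) :
    ∀ (l : List (Int × Int)) (a : Int),
      l.foldl
        (fun answer e =>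
          if wan.1 + wan.2 < e.1 + e.2 ∧ ¬ dominatedB scores e = true then answer + 1
          else answer) a
        = a + ((l.filter (fun e =>
            decide (wan.1 + wan.2 < e.1 + e.2) && !dominatedB scores e)).length : Int) := by
  intro l
  induction l with
  | nil => intro a; simp
  | cons e rest ih =>
    intro a
    by_cases hc : wan.1 + wan.2 < e.1 + e.2 ∧ ¬ dominatedB scores e = true
    · have hb : (decide (wan.1 + wan.2 < e.1 + e.2) && !dominatedB scores e) = true := by
        simp only [Bool.and_eq_true, decide_eq_true_eq, Bool.not_eq_true']
        exact ⟨hc.1, by simpa using hc.2⟩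
      simp only [List.foldl_cons, if_pos hc, ih, List.filter_cons, hb]
      rw [if_pos trivial]
      simp only [List.length_cons]
      push_cast
      omega
    · have hb : (decide (wan.1 + wan.2 < e.1 + e.2) && !dominatedB scores e) = false := by
        rw [Bool.eq_false_iff]
        intro h
        simp only [Bool.and_eq_true, decide_eq_true_eq, Bool.not_eq_true'] at h
        exact hc ⟨h.1, by simp [h.2]⟩
      simp only [List.foldl_cons, if_neg hc, ih, List.filter_cons, hb,
        Bool.false_eq_true, if_false]

lemma dominatedB_perm {S T : List (Int × Int)} (h : S.Perm T) (e : Int × Int) :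
    dominatedB S e = dominatedB T e := by
  cases hb : dominatedB T e
  · rw [Bool.eq_false_iff]
    intro hS
    rcases (dominatedB_iff S e).1 hS with ⟨f, hf, hd⟩
    exact absurd ((dominatedB_iff T e).2 ⟨f, h.mem_iff.1 hf, hd⟩) (by simp [hb])
  · rcases (dominatedB_iff T e).1 hb with ⟨f, hf, hd⟩
    exact (dominatedB_iff S e).2 ⟨f, h.mem_iff.2 hf, hd⟩

-- ===== VERDICT (by name: the statement is the Claim_ definition above) =====
theorem solution_spec : Claim_equal_solution := by
  intro scores _ hpre
  unfold Spec_solution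
  obtain ⟨wan, tl, rfl⟩ : ∃ w t, scores = w :: t := by
    cases scores with
    | nil => exact absurd rfl hpre
    | cons w t => exact ⟨w, t, rfl⟩
  set scores := wan :: tl with hscores
  have hget : PySem.List.pyGet? scores 0 = some wan := by
    simp [PySem.List.pyGet?, PySem.List.pyIdx?, hscores]
  set S := PySem.List.sorted2 scores (fun x => x.1) (fun x => -x.2) true with hSdef
  have hperm : S.Perm scores := PySem.List.sorted2_perm scores _ _ true
  have hSpw : S.Pairwise Pb := sorted2_pairwise scores
  obtain ⟨h₀, T, hScons⟩ : ∃ h₀ T, S = h₀ :: T := by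
    cases hC : S with
    | nil =>
      have := hperm.length_eq
      rw [hC, hscores] at this
      simp at this
    | cons h₀ T => exact ⟨h₀, T, rfl⟩
  have hgetS : PySem.List.pyGet? S 0 = some h₀ := by
    simp [PySem.List.pyGet?, PySem.List.pyIdx?, hScons]
  have hA : solution scores = loopA wan S h₀.2 1 := by
    simp only [solution, hget, ← hSdef, hgetS]
  by_cases hdom : dominatedB scores wan = true
  · -- some employee strictly dominates employee 0: both return -1
    rcases (dominatedB_iff scores wan).1 hdom with ⟨f, hf, hfd⟩
    have hA1 : solution scores = -1 := by
      rw [hA]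
      exact loopA_neg wan S _ _ ⟨f, hperm.mem_iff.2 hf, hfd⟩
    have hB1 : solution_alt scores = -1 := by
      simp only [solution_alt, hget, if_pos hdom]
    rw [hA1, hB1]
  · -- no dominator: both count the non-dominated employees with a larger total
    have hdom' : dominatedB scores wan = false := by simpa using hdom
    have hnd : ∀ f ∈ S, ¬ (wan.1 < f.1 ∧ wan.2 < f.2) := by
      intro f hf hc
      exact hdom (by exact (dominatedB_iff scores wan).2 ⟨f, hperm.mem_iff.1 hf, hc⟩)
    obtain ⟨i₀, j₀⟩ := h₀
    rcases List.pairwise_cons.1 (hScons ▸ hSpw) with ⟨hh₀T, _⟩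
    -- the first (max-key) element is never dominated
    have hh₀ND : dominatedB S (i₀, j₀) = false := by
      rw [Bool.eq_false_iff]
      intro hd
      rcases (dominatedB_iff S (i₀, j₀)).1 hd with ⟨f, hfS, hf1, hf2⟩
      rw [hScons] at hfS
      rcases List.mem_cons.1 hfS with hfS | hfS
      · subst hfS; omega
      · have := (Pb_iff _ _).1 (hh₀T f hfS); omega
    have hcount := loopA_count wan S hSpw T [(i₀, j₀)] j₀
      (if wan.1 + wan.2 < i₀ + j₀ then (1 : Int) + 1 else 1)
      (by rw [hScons]; rfl)
      (fun f hf => hnd f (hScons ▸ List.mem_cons_of_mem _ hf))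
      (by intro f hf; simp at hf; subst hf; exact le_refl _)
      ⟨(i₀, j₀), by simp⟩
    have hloop : loopA wan S j₀ 1
        = 1 + ((S.filter (fun e =>
            decide (wan.1 + wan.2 < e.1 + e.2) && !dominatedB S e)).length : Int) := by
      have hnd₀ : ¬ (wan.1 < i₀ ∧ wan.2 < j₀) := hnd (i₀, j₀) (hScons ▸ List.mem_cons_self ..)
      rw [hScons] at hcount hh₀ND ⊢
      simp only [loopA, if_neg hnd₀, if_pos (le_refl j₀)]
      rw [hcount, List.filter_cons]
      simp only [hh₀ND, Bool.not_false, Bool.and_true]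
      by_cases hsum : wan.1 + wan.2 < i₀ + j₀
      · rw [if_pos hsum, if_pos (decide_eq_true hsum)]
        simp only [List.length_cons]
        push_cast
        omega
      · rw [if_neg hsum, if_neg (by simpa using hsum)]
    have hpredeq : (fun e => decide (wan.1 + wan.2 < e.1 + e.2) && !dominatedB S e)
        = (fun e => decide (wan.1 + wan.2 < e.1 + e.2) && !dominatedB scores e) := by
      funext e
      rw [dominatedB_perm hperm e]
    have hlen : ((S.filter (fun e =>
            decide (wan.1 + wan.2 < e.1 + e.2) && !dominatedB S e)).length : Int)
        = ((scores.filter (fun e =>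
            decide (wan.1 + wan.2 < e.1 + e.2) && !dominatedB scores e)).length : Int) := by
      rw [hpredeq]
      exact_mod_cast (hperm.filter _).length_eq
    have hB : solution_alt scores
        = 1 + ((scores.filter (fun e =>
            decide (wan.1 + wan.2 < e.1 + e.2) && !dominatedB scores e)).length : Int) := by
      simp only [solution_alt, hget, hdom', Bool.false_eq_true, if_false]
      exact foldl_count wan scores scores 1
    rw [hA, hloop, hlen, hB]
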